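-- pv_equiv track=rewrite | github.com/LarsAsplund/github-facts | analyze_test_strategy.py | remove_fp
-- ===== SOURCE A (Python) =====
-- def remove_fp(repo_full_name, repo_stat, fp_repos):
--     """Remove false positive repositories."""
--     user_name = repo_full_name.split("/")[0]
--     if "%s/*" % user_name in fp_repos:
--         for framework in fp_repos["%s/*" % user_name]:
--             if framework in repo_stat["test_strategies"]:
--                 repo_stat["test_strategies"].remove(framework)
--
--     if repo_full_name in fp_repos:
--         for framework in fp_repos[repo_full_name]:
--             if framework in repo_stat["test_strategies"]:
--                 repo_stat["test_strategies"].remove(framework)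
--
--     return repo_stat
-- ===== SOURCE B (Python) =====
-- def remove_fp(repo_full_name, repo_stat, fp_repos):
--     """Remove false positive repositories.
--
--     Counter-based rewrite (alternative single-pass algorithm): build a multiset of frameworks to remove, then one
--     pass over the strategies keeps each element unless a removal credit is
--     left for it.  The strategies list is rebuilt in place (slice assignment),
--     so the same list object is mutated, like the original's .remove calls.
--     """
--     user_name = repo_full_name.split("/")[0]
--     to_remove = {}
--     for key in ("%s/*" % user_name, repo_full_name):
--         if key in fp_repos:
--             for framework in fp_repos[key]:
--                 to_remove[framework] = to_remove.get(framework, 0) + 1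
--     if to_remove:
--         kept = []
--         for strategy in repo_stat["test_strategies"]:
--             if to_remove.get(strategy, 0) > 0:
--                 to_remove[strategy] -= 1
--             else:
--                 kept.append(strategy)
--         repo_stat["test_strategies"][:] = kept
--     return repo_stat
-- ===== Notes on version B (the rewrite author's own statement) =====
-- stated objective: alternative
-- what changed: Replaces the per-framework membership-test-plus-list.remove scans with a dict counter of removal credits built once, then a single pass over the strategies that keeps each element unless a credit remains (decrementing it), rebuilding the list in place.
import Mathlib
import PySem

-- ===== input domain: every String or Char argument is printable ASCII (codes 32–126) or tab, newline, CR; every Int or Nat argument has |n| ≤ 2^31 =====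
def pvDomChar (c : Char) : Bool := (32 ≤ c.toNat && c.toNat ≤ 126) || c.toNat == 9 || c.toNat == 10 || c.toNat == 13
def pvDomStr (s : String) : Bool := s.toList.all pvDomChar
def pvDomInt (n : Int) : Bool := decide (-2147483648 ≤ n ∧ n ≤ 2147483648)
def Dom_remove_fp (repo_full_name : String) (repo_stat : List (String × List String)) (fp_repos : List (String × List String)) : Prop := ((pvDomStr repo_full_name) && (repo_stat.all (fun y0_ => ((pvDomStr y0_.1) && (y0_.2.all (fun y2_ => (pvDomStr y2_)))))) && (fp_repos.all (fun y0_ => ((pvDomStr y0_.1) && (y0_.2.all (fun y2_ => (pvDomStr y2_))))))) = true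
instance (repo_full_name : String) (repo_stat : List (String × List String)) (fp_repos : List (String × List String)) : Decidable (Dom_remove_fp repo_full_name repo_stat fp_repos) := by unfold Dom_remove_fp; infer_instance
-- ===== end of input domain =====

-- B replaces A's repeated membership-test + list.remove scans by a dict counter of
-- removal credits and one counting pass over the strategies; the equivalence proved here
-- is about the RETURN value — both Pythons also mutate repo_stat's "test_strategies"
-- list in place to the same content.

-- ===== PORT A =====
def remove_fp (repo_full_name : String) (repo_stat : List (String × List String)) (fp_repos : List (String × List String)) : List (String × List String) :=
  -- user_name = repo_full_name.split("/")[0]: sep "/" ≠ "" so split? is some, and a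
  -- split result is never empty, so [0] is its head (headD is exact here)
  let user_name := ((PySem.Str.split? repo_full_name "/").getD []).headD ""
  let fp := PySem.Dict.mk fp_repos
  let wild := user_name ++ "/*"
  let step : PySem.Dict String (List String) → String → PySem.Dict String (List String) :=
    fun d framework =>
      match d.get? "test_strategies" with        -- repo_stat["test_strategies"]; none = KeyError, excluded by Pre_
      | some ts => if ts.contains framework then d.insert "test_strategies" (ts.erase framework) else d
      | none => d
  let d0 := PySem.Dict.mk repo_stat
  let d1 := if fp.contains wild then (fp.getD wild []).foldl step d0 else d0
  let d2 := if fp.contains repo_full_name then (fp.getD repo_full_name []).foldl step d1 else d1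
  d2.items

-- ===== PORT B =====
def remove_fp_alt (repo_full_name : String) (repo_stat : List (String × List String)) (fp_repos : List (String × List String)) : List (String × List String) :=
  let user_name := ((PySem.Str.split? repo_full_name "/").getD []).headD ""
  let fp := PySem.Dict.mk fp_repos
  let to_remove : PySem.Dict String Int :=
    [user_name ++ "/*", repo_full_name].foldl
      (fun c key =>
        if fp.contains key then
          (fp.getD key []).foldl (fun d fw => d.insert fw (d.getD fw 0 + 1)) c
        else c)
      PySem.Dict.empty
  if to_remove.items.isEmpty then repo_stat
  else
    match (PySem.Dict.mk repo_stat).get? "test_strategies" with   -- none = KeyError, excluded by Pre_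
    | some ts =>
        let fin := ts.foldl
          (fun (acc : List String × PySem.Dict String Int) s =>
            if acc.2.getD s 0 > 0 then (acc.1, acc.2.insert s (acc.2.getD s 0 - 1))
            else (acc.1 ++ [s], acc.2))
          ([], to_remove)
        ((PySem.Dict.mk repo_stat).insert "test_strategies" fin.1).items
    | none => repo_stat

-- ===== PRECONDITION & SPEC =====
-- Pre_ excludes exactly the inputs where both Pythons raise: a KeyError when some
-- matching fp_repos entry is nonempty but repo_stat lacks "test_strategies"; and it
-- requires repo_stat's keys to be distinct, since a Python dict cannot carry duplicate
-- keys (an association list with duplicates represents no Python input).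
def Pre_remove_fp (repo_full_name : String) (repo_stat : List (String × List String)) (fp_repos : List (String × List String)) : Prop :=
  (repo_stat.map Prod.fst).Nodup ∧
  (((PySem.Dict.mk fp_repos).getD (((PySem.Str.split? repo_full_name "/").getD []).headD "" ++ "/*") [] ≠ [] ∨
    (PySem.Dict.mk fp_repos).getD repo_full_name [] ≠ []) →
   (PySem.Dict.mk repo_stat).contains "test_strategies" = true)
instance (repo_full_name : String) (repo_stat : List (String × List String)) (fp_repos : List (String × List String)) : Decidable (Pre_remove_fp repo_full_name repo_stat fp_repos) := by unfold Pre_remove_fp; infer_instance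

def pvWitness_remove_fp : String × (List (String × List String)) × (List (String × List String)) :=
  ("u/r", [("test_strategies", ["x", "y", "x"])], [("u/*", ["x", "x", "z"]), ("u/r", ["y"])])

def Spec_remove_fp (repo_full_name : String) (repo_stat : List (String × List String)) (fp_repos : List (String × List String)) (out : List (String × List String)) : Prop := out = remove_fp_alt repo_full_name repo_stat fp_repos
instance (repo_full_name : String) (repo_stat : List (String × List String)) (fp_repos : List (String × List String)) (out : List (String × List String)) : Decidable (Spec_remove_fp repo_full_name repo_stat fp_repos out) := by unfold Spec_remove_fp; infer_instance

-- ===== CLAIM (what is proved, stated in full; the proofs are below) =====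
def Claim_equal_remove_fp : Prop := ∀ (repo_full_name : String) (repo_stat : List (String × List String)) (fp_repos : List (String × List String)), Dom_remove_fp repo_full_name repo_stat fp_repos → Pre_remove_fp repo_full_name repo_stat fp_repos → Spec_remove_fp repo_full_name repo_stat fp_repos (remove_fp repo_full_name repo_stat fp_repos)

-- ===== LEMMAS AND PROOFS =====


-- proof helpers: A's per-framework step on the strategies list, and the counting filter
def eraseStep (ts : List String) (fw : String) : List String :=
  if ts.contains fw then ts.erase fw else ts

def filterCnt : List String → (String → Int) → List String
  | [], _ => []
  | t :: ts, c => if c t > 0 then filterCnt ts (Function.update c t (c t - 1)) else t :: filterCnt ts c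

theorem dict_insert_self {ν : Type} (d : PySem.Dict String ν) (k : String) (v : ν)
    (hnd : d.keys.Nodup) (h : d.get? k = some v) : d.insert k v = d := by
  have hc : d.contains k = true := by rw [PySem.Dict.contains_eq_isSome_get?, h]; rfl
  apply PySem.Dict.ext
  rw [PySem.Dict.items_insert_of_contains d v hc]
  have hmap : ∀ p ∈ d.items, (if (p.1 == k) = true then (k, v) else p) = p := by
    intro p hp
    obtain ⟨p1, p2⟩ := p
    by_cases he : p1 = k
    · subst he
      have hg : d.get? p1 = some p2 := PySem.Dict.get?_of_mem_items d hp hnd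
      rw [h] at hg
      have hv : v = p2 := Option.some_inj.mp hg
      simp [hv]
    · simp [he]
  rw [List.map_congr_left hmap]
  simp

theorem A_fold (k : String) (l : List String) :
    ∀ (d : PySem.Dict String (List String)) (ts : List String),
      d.keys.Nodup → d.get? k = some ts →
      l.foldl (fun d framework =>
        match d.get? k with
        | some ts => if ts.contains framework then d.insert k (ts.erase framework) else d
        | none => d) d
      = d.insert k (l.foldl eraseStep ts) := by
  induction l with
  | nil => intro d ts hnd h; simp [dict_insert_self d k ts hnd h]
  | cons fw l ih =>
    intro d ts hnd h
    simp only [List.foldl_cons, h]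
    by_cases hc : ts.contains fw
    · have hck : d.contains k = true := by rw [PySem.Dict.contains_eq_isSome_get?, h]; rfl
      rw [if_pos hc]
      rw [ih (d.insert k (ts.erase fw)) (ts.erase fw)
            (by rw [PySem.Dict.keys_insert_of_contains d _ hck]; exact hnd)
            (PySem.Dict.get?_insert_self d k _)]
      rw [PySem.Dict.insert_insert_self]
      simp only [eraseStep]
      rw [if_pos hc]
    · rw [if_neg hc]
      rw [ih d ts hnd h]
      simp only [eraseStep]
      rw [if_neg hc]

theorem filterCnt_nonpos : ∀ (ts : List String) (c : String → Int), (∀ s, c s ≤ 0) → filterCnt ts c = ts := by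
  intro ts
  induction ts with
  | nil => intro c _; rfl
  | cons t ts ih =>
    intro c hc
    rw [filterCnt, if_neg (by have := hc t; omega), ih c hc]

theorem bump_filter : ∀ (ts : List String) (c : String → Int) (fw : String), (∀ s, 0 ≤ c s) →
    filterCnt ts (Function.update c fw (c fw + 1)) = filterCnt (eraseStep ts fw) c := by
  intro ts
  induction ts with
  | nil => intro c fw _; rfl
  | cons t ts ih =>
    intro c fw hc
    by_cases he : t = fw
    · subst he
      rw [filterCnt, if_pos (by simp [Function.update]; have := hc t; omega)]
      have h1 : Function.update (Function.update c t (c t + 1)) t (Function.update c t (c t + 1) t - 1) = c := by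
        funext s; by_cases hs : s = t <;> simp [Function.update, hs]
      rw [h1]
      rw [eraseStep, if_pos (by simp)]
      simp [List.erase_cons_head]
    · have hne : Function.update c fw (c fw + 1) t = c t := by simp [Function.update, he]
      have h3 : eraseStep (t :: ts) fw = t :: eraseStep ts fw := by
        by_cases hm : ts.contains fw
        · rw [eraseStep, eraseStep, if_pos hm, if_pos (by simp only [List.contains_cons]; simp; exact Or.inr (by simpa using hm)),
              List.erase_cons_tail (by simp [he])]
        · rw [eraseStep, eraseStep, if_neg hm, if_neg (by simp only [List.contains_cons]; simp; exact ⟨fun h => he h.symm, by simpa using hm⟩)]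
      by_cases hp : c t > 0
      · rw [filterCnt, hne, if_pos hp]
        have h2 : Function.update (Function.update c fw (c fw + 1)) t (c t - 1)
            = Function.update (Function.update c t (c t - 1)) fw (Function.update c t (c t - 1) fw + 1) := by
          funext s
          by_cases hs : s = t
          · subst hs; simp [Function.update, he]
          · by_cases hsf : s = fw
            · have hft : fw ≠ t := fun h => hs (by rw [hsf, h])
              simp [Function.update, hsf, hft]
            · simp [Function.update, hs, hsf]
        rw [h2, ih (Function.update c t (c t - 1)) fw
              (by intro s; by_cases hs : s = t
                  · subst hs; simp [Function.update]; have := hc s; omega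
                  · simp [Function.update, hs]; exact hc s)]
        rw [h3, filterCnt, if_pos hp]
      · rw [filterCnt, hne, if_neg hp, ih c fw hc, h3, filterCnt, if_neg hp]

theorem erase_filter : ∀ (l ts : List String),
    l.foldl eraseStep ts = filterCnt ts (fun s => (l.count s : Int)) := by
  intro l
  induction l with
  | nil => intro ts; rw [List.foldl_nil, filterCnt_nonpos ts _ (by simp)]
  | cons fw l ih =>
    intro ts
    rw [List.foldl_cons, ih (eraseStep ts fw)]
    rw [← bump_filter ts (fun s => (l.count s : Int)) fw (by intro s; positivity)]
    congr 1
    funext s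
    by_cases hs : s = fw
    · subst hs; simp [Function.update]
    · have hfs : ¬ fw = s := fun h => hs h.symm
      simp [Function.update, hs, hfs]

theorem B_fold : ∀ (ts kept : List String) (d : PySem.Dict String Int),
    (ts.foldl (fun (acc : List String × PySem.Dict String Int) s =>
        if acc.2.getD s 0 > 0 then (acc.1, acc.2.insert s (acc.2.getD s 0 - 1))
        else (acc.1 ++ [s], acc.2)) (kept, d)).1
      = kept ++ filterCnt ts (fun s => d.getD s 0) := by
  intro ts
  induction ts with
  | nil => intro kept d; simp [filterCnt]
  | cons t ts ih =>
    intro kept d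
    rw [List.foldl_cons]
    by_cases hp : d.getD t 0 > 0
    · rw [if_pos hp]
      rw [ih kept (d.insert t (d.getD t 0 - 1))]
      rw [filterCnt, if_pos hp]
      congr 2
      funext s
      by_cases hs : s = t <;> simp [PySem.Dict.getD_insert, Function.update, hs]
    · rw [if_neg hp]
      rw [ih (kept ++ [t]) d]
      rw [filterCnt, if_neg hp]
      simp

theorem ofList_eq_nil (l : List String) : PySem.Set.ofList l = [] ↔ l = [] := by
  cases l with
  | nil => simp
  | cons x xs => simp [PySem.Set.ofList_cons]

theorem fold_if {α β : Type} (c : Bool) (l : List β) (f : α → β → α) (d : α) (hl : c = false → l = []) :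
    (if c then l.foldl f d else d) = l.foldl f d := by
  cases c
  · rw [hl rfl]; rfl
  · rfl

-- ===== VERDICT (by name: the statement is the Claim_ definition above) =====
theorem remove_fp_spec : Claim_equal_remove_fp := by
  unfold Claim_equal_remove_fp
  intro rfn rs fp _ hpre
  obtain ⟨hnd, hkey⟩ := hpre
  unfold Spec_remove_fp remove_fp remove_fp_alt
  simp only []
  set user := ((PySem.Str.split? rfn "/").getD []).headD "" with huser
  set fpd := PySem.Dict.mk fp with hfpd
  set wild := user ++ "/*" with hwild
  set d0 := PySem.Dict.mk rs with hd0
  set l1 := fpd.getD wild [] with hl1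
  set l2 := fpd.getD rfn [] with hl2
  rw [List.foldl_cons, List.foldl_cons, List.foldl_nil]
  rw [fold_if (fpd.contains wild) l1 _ d0
        (fun hc => by rw [hl1, PySem.Dict.getD_of_not_contains fpd [] hc]),
      fold_if (fpd.contains rfn) l2 _ _
        (fun hc => by rw [hl2, PySem.Dict.getD_of_not_contains fpd [] hc]),
      fold_if (fpd.contains wild) l1 _ PySem.Dict.empty
        (fun hc => by rw [hl1, PySem.Dict.getD_of_not_contains fpd [] hc]),
      fold_if (fpd.contains rfn) l2 _ _
        (fun hc => by rw [hl2, PySem.Dict.getD_of_not_contains fpd [] hc])]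
  rw [← List.foldl_append]
  have hBfold : List.foldl (fun (d : PySem.Dict String Int) fw => d.insert fw (d.getD fw 0 + 1))
      (List.foldl (fun (d : PySem.Dict String Int) fw => d.insert fw (d.getD fw 0 + 1)) PySem.Dict.empty l1) l2
      = List.foldl (fun (d : PySem.Dict String Int) fw => d.insert fw (d.getD fw 0 + 1)) PySem.Dict.empty (l1 ++ l2) :=
    (List.foldl_append ..).symm
  rw [hBfold]
  by_cases hL : l1 ++ l2 = []
  · rw [hL, List.foldl_nil, List.foldl_nil]
    rfl
  · have hkts : d0.contains "test_strategies" = true := by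
      apply hkey
      by_contra hno
      rw [not_or, not_not, not_not] at hno
      exact hL (by rw [hno.1, hno.2]; rfl)
    obtain ⟨ts, hts⟩ : ∃ ts, d0.get? "test_strategies" = some ts := by
      rw [PySem.Dict.contains_eq_isSome_get?] at hkts
      exact Option.isSome_iff_exists.mp hkts
    have hnd0 : d0.keys.Nodup := by
      have hk : d0.keys = rs.map Prod.fst := rfl
      rw [hk]; exact hnd
    rw [A_fold "test_strategies" (l1 ++ l2) d0 ts hnd0 hts]
    set C := List.foldl (fun (d : PySem.Dict String Int) fw => d.insert fw (d.getD fw 0 + 1)) PySem.Dict.empty (l1 ++ l2) with hC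
    have hkeys : C.keys = PySem.Set.ofList (l1 ++ l2) := by
      rw [hC, PySem.Dict.keys_foldl_insert (l1 ++ l2) (fun d x => d.getD x 0 + 1) PySem.Dict.empty]
      show PySem.Set.update ([] : List String) (l1 ++ l2) = _
      exact PySem.Set.update_nil_left _
    have hitems : C.items ≠ [] := by
      intro h0
      have hk0 : C.keys = [] := by
        show List.map _ C.items = _
        rw [h0]
        rfl
      rw [hkeys] at hk0
      exact hL ((ofList_eq_nil _).mp hk0)
    have hcond : ¬ (C.items.isEmpty = true) := fun hemp => hitems (by simpa using hemp)
    rw [if_neg hcond]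
    simp only [hts]
    rw [B_fold ts [] C, List.nil_append, erase_filter]
    have hc : (fun s => ((l1 ++ l2).count s : Int)) = fun s => C.getD s 0 := by
      funext s
      rw [hC, PySem.Dict.getD_foldl_insert_add_one, PySem.Dict.getD_empty]
      simp
    rw [hc]
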